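-- pv_equiv track=rewrite | github.com/SukbeomH/Acta-Ergo-Sum | acta/deep/detector.py | detect_entry_points
-- ===== SOURCE A (Python) =====
-- import fnmatch
--
-- ENTRY_POINT_PATTERNS: list[str] = [
--     "main.*",
--     "index.*",
--     "app.*",
--     "server.*",
--     "cli.*",
--     "cmd/main.*",
--     "src/main.*",
--     "src/index.*",
--     "src/app.*",
--     "src/lib.*",
--     "lib/index.*",
-- ]
--
-- _SKIP_EXTENSIONS = {".md", ".txt", ".json", ".yaml", ".yml", ".toml", ".lock", ".css", ".svg", ".png", ".jpg"}
--
-- def detect_entry_points(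
--     tree_paths: list[str], manifest_hint: str | None = None,
-- ) -> list[str]:
--     """프로젝트 진입점 파일을 추정한다.
--
--     manifest_hint: 매니페스트에서 추출한 진입점 경로 (e.g. "src/index.ts").
--     """
--     entries: list[str] = []
--
--     # 매니페스트 힌트가 있으면 최우선
--     if manifest_hint and manifest_hint in tree_paths:
--         entries.append(manifest_hint)
--
--     # 패턴 매칭
--     for pattern in ENTRY_POINT_PATTERNS:
--         for path in tree_paths:
--             # 최상위 또는 src/ 아래만 (깊은 경로 제외)
--             depth = path.count("/")
--             if depth > 2:
--                 continue
--             ext = "." + path.rsplit(".", 1)[-1] if "." in path else ""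
--             if ext in _SKIP_EXTENSIONS:
--                 continue
--             if fnmatch.fnmatch(path.split("/")[-1], pattern.split("/")[-1]):
--                 if path not in entries:
--                     entries.append(path)
--
--     return entries[:5]  # 최대 5개
-- ===== SOURCE B (Python) =====
-- _SKIP_EXTENSIONS = {".md", ".txt", ".json", ".yaml", ".yml", ".toml", ".lock", ".css", ".svg", ".png", ".jpg"}
--
-- # Distinct basename prefixes of ENTRY_POINT_PATTERNS, in first-occurrence order.
-- _PREFIXES = ["main.", "index.", "app.", "server.", "cli.", "lib."]
--
--
-- def _rank(path):
--     """Pattern rank of an eligible path, or None."""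
--     if path.count("/") > 2:
--         return None
--     ext = "." + path.rsplit(".", 1)[-1] if "." in path else ""
--     if ext in _SKIP_EXTENSIONS:
--         return None
--     base = path.split("/")[-1]
--     for r, pre in enumerate(_PREFIXES):
--         if base.startswith(pre):
--             return r
--     return None
--
--
-- def detect_entry_points(tree_paths, manifest_hint=None):
--     head = [manifest_hint] if manifest_hint and manifest_hint in tree_paths else []
--     seen = set(head)
--     ranked = []
--     for path in tree_paths:
--         r = _rank(path)
--         if r is not None and path not in seen:
--             seen.add(path)
--             ranked.append((r, path))
--     return (head + [p for r in range(len(_PREFIXES)) for rk, p in ranked if rk == r])[:5]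
-- ===== Notes on version B (the rewrite author's own statement) =====
-- stated objective: faster
-- what changed: A scans the whole path list once per pattern (11 pattern-major passes with a growing dedup list); B makes a single path-major pass computing each path's first matching pattern rank with a seen-set, then emits the matches grouped by rank, which reproduces A's pattern-major order.
import Mathlib
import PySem

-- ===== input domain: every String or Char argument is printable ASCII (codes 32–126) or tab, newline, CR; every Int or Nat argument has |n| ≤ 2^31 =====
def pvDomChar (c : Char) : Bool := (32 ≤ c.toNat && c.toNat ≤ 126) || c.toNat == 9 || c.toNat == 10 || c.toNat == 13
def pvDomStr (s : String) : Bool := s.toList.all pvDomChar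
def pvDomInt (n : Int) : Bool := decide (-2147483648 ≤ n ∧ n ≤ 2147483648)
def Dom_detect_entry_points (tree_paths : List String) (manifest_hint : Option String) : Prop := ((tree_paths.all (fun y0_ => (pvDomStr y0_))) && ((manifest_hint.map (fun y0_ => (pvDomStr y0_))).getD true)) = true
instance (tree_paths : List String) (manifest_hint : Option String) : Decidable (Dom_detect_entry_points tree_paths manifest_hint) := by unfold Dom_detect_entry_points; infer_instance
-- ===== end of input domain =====

-- B replaces A's pattern-major nested scan by one eligibility/rank pass over the paths plus a grouping by
-- rank (path-major traversal); return value only, no argument is mutated.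

-- ===== PORT A =====
def pvSkipExts : List String :=
  [".md", ".txt", ".json", ".yaml", ".yml", ".toml", ".lock", ".css", ".svg", ".png", ".jpg"]

def pvEntryPatterns : List String :=
  ["main.*", "index.*", "app.*", "server.*", "cli.*", "cmd/main.*", "src/main.*",
   "src/index.*", "src/app.*", "src/lib.*", "lib/index.*"]

-- hand port of `path.rsplit(".", 1)[-1]`: the segment after the LAST '.'; exact whenever '.' occurs in
-- the string, which is the only case the ports use it in
def pvAfterLastDot (cs : List Char) : List Char :=
  (cs.reverse.takeWhile (fun c => c ≠ '.')).reverse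

-- `"." + path.rsplit(".", 1)[-1] if "." in path else ""`
def pvExt (path : String) : String :=
  if PySem.Str.isIn "." path then String.ofList ('.' :: pvAfterLastDot path.toList) else ""

-- `s.split("/")[-1]`: the sep "/" is nonempty so split? always returns some nonempty list and the
-- defaults are never taken
def pvBasename (s : String) : String :=
  PySem.List.pyGetD ((PySem.Str.split? s "/").getD []) (-1) ""

-- hand port of `fnmatch.fnmatch(name, pat)`, exact for the patterns this file uses: every
-- `pattern.split("/")[-1]` is "<literal>.*" — its sole wildcard is one trailing '*' (which matches any
-- sequence) and POSIX normcase is the identity, so fnmatch holds iff name starts with pat minus the '*'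
def pvFnmatch (name pat : String) : Bool :=
  PySem.Chars.startswith name.toList pat.toList.dropLast

def detect_entry_points (tree_paths : List String) (manifest_hint : Option String) : List String :=
  let entries : List String :=
    match manifest_hint with
    | some h => if h ≠ "" ∧ h ∈ tree_paths then [h] else []
    | none => []
  let entries := pvEntryPatterns.foldl (fun entries pattern =>
    tree_paths.foldl (fun entries path =>
      if PySem.Str.count path "/" > 2 then entries
      else if pvExt path ∈ pvSkipExts then entries
      else if pvFnmatch (pvBasename path) (pvBasename pattern) = true then
        if path ∉ entries then entries ++ [path] else entries
      else entries) entries) entries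
  entries.take 5

-- ===== PORT B =====
-- the distinct basename prefixes of ENTRY_POINT_PATTERNS, in first-occurrence order
def pvPrefixes : List String :=
  ["main.", "index.", "app.", "server.", "cli.", "lib."]

def pvRank (path : String) : Option Int :=
  if PySem.Str.count path "/" > 2 then none
  else if pvExt path ∈ pvSkipExts then none
  else (PySem.List.enumerate pvPrefixes).findSome? (fun rp =>
    if PySem.Str.startswith (pvBasename path) rp.2 then some rp.1 else none)

def detect_entry_points_alt (tree_paths : List String) (manifest_hint : Option String) : List String :=
  let head : List String :=
    match manifest_hint with
    | some h => if h ≠ "" ∧ h ∈ tree_paths then [h] else []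
    | none => []
  let st := tree_paths.foldl
    (fun (st : PySem.Set String × List (Int × String)) path =>
      match pvRank path with
      | some r => if st.1.contains path then st else (st.1.add path, st.2 ++ [(r, path)])
      | none => st)
    (PySem.Set.ofList head, [])
  (head ++ (PySem.List.pyRange 0 (pvPrefixes.length : Int) 1).flatMap
      (fun r => (st.2.filter (fun rp => rp.1 == r)).map (·.2))).take 5

-- ===== PRECONDITION & SPEC =====
def Spec_detect_entry_points (tree_paths : List String) (manifest_hint : Option String) (out : List String) : Prop := out = detect_entry_points_alt tree_paths manifest_hint
instance (tree_paths : List String) (manifest_hint : Option String) (out : List String) : Decidable (Spec_detect_entry_points tree_paths manifest_hint out) := by unfold Spec_detect_entry_points; infer_instance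

-- ===== CLAIM (what is proved, stated in full; the proofs are below) =====
def Claim_equal_detect_entry_points : Prop := ∀ (tree_paths : List String) (manifest_hint : Option String), Dom_detect_entry_points tree_paths manifest_hint → Spec_detect_entry_points tree_paths manifest_hint (detect_entry_points tree_paths manifest_hint)

-- ===== LEMMAS AND PROOFS =====

-- the paths A's pass for one pattern (of rank r) appends to an `entries` list s: the eligible matching
-- paths of t, first occurrences only, that are not already in s
def pvNews (r : Int) (s : List String) : List String → List String
  | [] => []
  | x :: t => if pvRank x = some r ∧ x ∉ s then x :: pvNews r (s ++ [x]) t else pvNews r s t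

-- membership in a pvNews list forces the rank
theorem pvNews_rank (r : Int) : ∀ (t s : List String) (x : String),
    x ∈ pvNews r s t → pvRank x = some r
  | [], _, x => by simp [pvNews]
  | a :: t, s, x => by
    simp only [pvNews]
    split_ifs with h
    · intro hm
      rcases List.mem_cons.mp hm with rfl | hm
      · exact h.1
      · exact pvNews_rank r t (s ++ [a]) x hm
    · exact pvNews_rank r t s x

-- pvNews only looks at the forbidden list through membership of rank-r strings
theorem pvNews_congr (r : Int) : ∀ (t s s' : List String),
    (∀ y, pvRank y = some r → (y ∈ s ↔ y ∈ s')) → pvNews r s t = pvNews r s' t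
  | [], _, _, _ => rfl
  | a :: t, s, s', h => by
    simp only [pvNews]
    by_cases ha : pvRank a = some r ∧ a ∉ s
    · rw [if_pos ha, if_pos ⟨ha.1, fun hm => ha.2 ((h a ha.1).mpr hm)⟩]
      exact congrArg (a :: ·) (pvNews_congr r t (s ++ [a]) (s' ++ [a])
        (fun y hy => by simp only [List.mem_append, List.mem_singleton]
                        exact or_congr (h y hy) Iff.rfl))
    · rw [if_neg ha, if_neg (fun hc => ha ⟨hc.1, fun hm => hc.2 ((h a hc.1).mp hm)⟩)]
      exact pvNews_congr r t s s' h

-- a forbidden suffix that holds no rank-r strings can be dropped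
theorem pvNews_drop_append (r : Int) (t s n : List String)
    (h : ∀ y ∈ n, pvRank y ≠ some r) : pvNews r (s ++ n) t = pvNews r s t :=
  pvNews_congr r t (s ++ n) s (fun y hy => by
    simp only [List.mem_append]
    exact ⟨fun hc => hc.elim id (fun hn => absurd hy (h y hn)), Or.inl⟩)

-- every rank-r element of t ends up in the forbidden list or in the harvest
theorem pvNews_absorb (r : Int) : ∀ (t s : List String) (x : String),
    x ∈ t → pvRank x = some r → x ∈ s ∨ x ∈ pvNews r s t
  | a :: t, s, x, hx, hr => by
    simp only [pvNews]
    by_cases ha : pvRank a = some r ∧ a ∉ s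
    · rw [if_pos ha]
      rcases List.mem_cons.mp hx with rfl | hx'
      · exact Or.inr (List.mem_cons_self ..)
      · rcases pvNews_absorb r t (s ++ [a]) x hx' hr with hm | hm
        · rcases List.mem_append.mp hm with hm | hm
          · exact Or.inl hm
          · exact Or.inr (List.mem_cons.mpr (Or.inl (List.mem_singleton.mp hm)))
        · exact Or.inr (List.mem_cons_of_mem _ hm)
    · rw [if_neg ha]
      rcases List.mem_cons.mp hx with rfl | hx'
      · rcases not_and_or.mp ha with hr' | hs
        · exact absurd hr hr'
        · exact Or.inl (not_not.mp hs)
      · exact pvNews_absorb r t s x hx' hr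

-- a second pass for an already-harvested rank adds nothing
theorem pvNews_nil (r : Int) : ∀ (t s : List String),
    (∀ x ∈ t, pvRank x = some r → x ∈ s) → pvNews r s t = []
  | [], _, _ => rfl
  | a :: t, s, h => by
    simp only [pvNews]
    rw [if_neg (fun hc => hc.2 (h a (List.mem_cons_self ..) hc.1))]
    exact pvNews_nil r t s (fun x hx hr => h x (List.mem_cons_of_mem _ hx) hr)

-- A's inner loop for one pattern appends exactly pvNews, provided the pattern's test characterises rank r
theorem pvFoldlA (pat : String) (r : Int)
    (hC : ∀ x : String, pvRank x = some r ↔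
      (¬ PySem.Str.count x "/" > 2 ∧ pvExt x ∉ pvSkipExts ∧
        pvFnmatch (pvBasename x) (pvBasename pat) = true)) :
    ∀ (t e : List String),
    t.foldl (fun entries path =>
      if PySem.Str.count path "/" > 2 then entries
      else if pvExt path ∈ pvSkipExts then entries
      else if pvFnmatch (pvBasename path) (pvBasename pat) = true then
        if path ∉ entries then entries ++ [path] else entries
      else entries) e = e ++ pvNews r e t := by
  intro t
  induction t with
  | nil => intro e; simp [pvNews]
  | cons x t ih =>
    intro e
    simp only [List.foldl_cons, pvNews]
    by_cases h1 : PySem.Str.count x "/" > 2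
    · rw [if_pos h1, if_neg (fun hc => ((hC x).mp hc.1).1 h1), ih e]
    · rw [if_neg h1]
      by_cases h2 : pvExt x ∈ pvSkipExts
      · rw [if_pos h2, if_neg (fun hc => ((hC x).mp hc.1).2.1 h2), ih e]
      · rw [if_neg h2]
        by_cases h3 : pvFnmatch (pvBasename x) (pvBasename pat) = true
        · rw [if_pos h3]
          have hr : pvRank x = some r := (hC x).mpr ⟨h1, h2, h3⟩
          by_cases h4 : x ∈ e
          · rw [if_neg (not_not.mpr h4), if_neg (fun hc => hc.2 h4), ih e]
          · rw [if_pos h4, if_pos ⟨hr, h4⟩, ih (e ++ [x])]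
            simp
        · rw [if_neg h3, if_neg (fun hc => h3 ((hC x).mp hc.1).2.2), ih e]

-- B's single pass, filtered to one rank, harvests exactly pvNews
theorem pvFoldlB (r : Int) : ∀ (t : List String) (seen : PySem.Set String)
    (acc : List (Int × String)) (f : List String),
    (∀ y, pvRank y = some r → (PySem.Set.contains seen y = true ↔ y ∈ f)) →
    ((t.foldl (fun (st : PySem.Set String × List (Int × String)) path =>
        match pvRank path with
        | some rr => if PySem.Set.contains st.1 path then st else (PySem.Set.add st.1 path, st.2 ++ [(rr, path)])
        | none => st) (seen, acc)).2.filter (fun rp => rp.1 == r)).map (·.2)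
      = (acc.filter (fun rp => rp.1 == r)).map (·.2) ++ pvNews r f t
  | [], seen, acc, f, h => by simp [pvNews]
  | x :: t, seen, acc, f, h => by
    simp only [List.foldl_cons, pvNews]
    cases hx : pvRank x with
    | none =>
      rw [if_neg (fun hc => by simp at hc)]
      exact pvFoldlB r t seen acc f h
    | some rr =>
      by_cases hc : PySem.Set.contains seen x = true
      · simp only [if_pos hc]
        rw [if_neg (fun hcc => hcc.2 ((h x (hx.trans hcc.1)).mp hc))]
        exact pvFoldlB r t seen acc f h
      · simp only [if_neg hc]
        by_cases hrr : rr = r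
        · have hxr : pvRank x = some r := hx.trans (by rw [hrr])
          have hnf : x ∉ f := fun hm => hc ((h x hxr).mpr hm)
          rw [if_pos ⟨by rw [hrr], hnf⟩]
          rw [pvFoldlB r t (PySem.Set.add seen x) (acc ++ [(rr, x)]) (f ++ [x])
            (fun y hy => by
              rw [PySem.Set.contains_iff, PySem.Set.mem_add]
              simp only [List.mem_append, List.mem_singleton]
              rw [← PySem.Set.contains_iff, h y hy])]
          simp [List.filter_append, hrr]
        · rw [if_neg (fun hcc => hrr (Option.some.inj hcc.1))]
          rw [pvFoldlB r t (PySem.Set.add seen x) (acc ++ [(rr, x)]) f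
            (fun y hy => by
              rw [PySem.Set.contains_iff, PySem.Set.mem_add]
              have hyx : y ≠ x :=
                fun he => hrr (Option.some.inj (hx.symm.trans (he ▸ hy)))
              simp only [hyx, or_false]
              rw [← PySem.Set.contains_iff, h y hy])]
          have hne : ((rr, x).1 == r) = false := by simp [hrr]
          simp [List.filter_append, hne]

-- pvRank, spelled out over the six concrete prefixes
theorem pvRank_unfold (x : String) : pvRank x =
    (if PySem.Str.count x "/" > 2 then none
     else if pvExt x ∈ pvSkipExts then none
     else if PySem.Str.startswith (pvBasename x) "main." then some 0
     else if PySem.Str.startswith (pvBasename x) "index." then some 1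
     else if PySem.Str.startswith (pvBasename x) "app." then some 2
     else if PySem.Str.startswith (pvBasename x) "server." then some 3
     else if PySem.Str.startswith (pvBasename x) "cli." then some 4
     else if PySem.Str.startswith (pvBasename x) "lib." then some 5
     else none) := by
  simp only [pvRank, pvPrefixes, PySem.List.enumerate_cons, PySem.List.enumerate_nil,
    List.findSome?_cons, List.findSome?_nil]
  norm_num
  split_ifs <;> rfl

-- a string starting with a nonempty prefix shares its first character
theorem pvHead_of_sw (b p : String) (c : Char) (h : PySem.Str.startswith b p = true)
    (hp : p.toList.head? = some c) : b.toList.head? = some c := by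
  rw [PySem.Str.startswith_eq, PySem.Chars.startswith_iff] at h
  obtain ⟨u, hu⟩ := h
  cases hpl : p.toList with
  | nil => rw [hpl] at hp; simp at hp
  | cons a as =>
    rw [hpl] at hu hp
    rw [← hu]
    simpa using hp

-- the six prefixes have pairwise distinct first characters, so at most one of them can match
theorem pvSw_false (b p q : String) (c d : Char) (hp : p.toList.head? = some c)
    (hq : q.toList.head? = some d) (hcd : c ≠ d)
    (h : PySem.Str.startswith b p = true) : PySem.Str.startswith b q = false := by
  by_contra hq'
  have h1 := pvHead_of_sw b p c h hp
  have h2 := pvHead_of_sw b q d (by simpa using hq') hq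
  rw [h1] at h2
  exact hcd (Option.some.inj h2)

theorem pvRank_iff_0 (x : String) : pvRank x = some 0 ↔
    (¬ PySem.Str.count x "/" > 2 ∧ pvExt x ∉ pvSkipExts ∧
      PySem.Str.startswith (pvBasename x) "main." = true) := by
  rw [pvRank_unfold]
  constructor
  · intro h
    by_cases h1 : PySem.Str.count x "/" > 2
    · rw [if_pos h1] at h; simp at h
    rw [if_neg h1] at h
    by_cases h2 : pvExt x ∈ pvSkipExts
    · rw [if_pos h2] at h; simp at h
    rw [if_neg h2] at h
    refine ⟨h1, h2, ?_⟩
    split_ifs at h with s0 s1 s2 s3 s4 s5 <;> simp_all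
  · rintro ⟨h1, h2, hs⟩
    rw [if_neg h1, if_neg h2]
    simp at hs
    simp [hs]

theorem pvRank_iff_1 (x : String) : pvRank x = some 1 ↔
    (¬ PySem.Str.count x "/" > 2 ∧ pvExt x ∉ pvSkipExts ∧
      PySem.Str.startswith (pvBasename x) "index." = true) := by
  rw [pvRank_unfold]
  constructor
  · intro h
    by_cases h1 : PySem.Str.count x "/" > 2
    · rw [if_pos h1] at h; simp at h
    rw [if_neg h1] at h
    by_cases h2 : pvExt x ∈ pvSkipExts
    · rw [if_pos h2] at h; simp at h
    rw [if_neg h2] at h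
    refine ⟨h1, h2, ?_⟩
    split_ifs at h with s0 s1 s2 s3 s4 s5 <;> simp_all
  · rintro ⟨h1, h2, hs⟩
    rw [if_neg h1, if_neg h2]
    have f0 := pvSw_false (pvBasename x) "index." "main." 'i' 'm' (by decide) (by decide) (by decide) hs
    simp at f0 hs
    simp [f0, hs]

theorem pvRank_iff_2 (x : String) : pvRank x = some 2 ↔
    (¬ PySem.Str.count x "/" > 2 ∧ pvExt x ∉ pvSkipExts ∧
      PySem.Str.startswith (pvBasename x) "app." = true) := by
  rw [pvRank_unfold]
  constructor
  · intro h
    by_cases h1 : PySem.Str.count x "/" > 2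
    · rw [if_pos h1] at h; simp at h
    rw [if_neg h1] at h
    by_cases h2 : pvExt x ∈ pvSkipExts
    · rw [if_pos h2] at h; simp at h
    rw [if_neg h2] at h
    refine ⟨h1, h2, ?_⟩
    split_ifs at h with s0 s1 s2 s3 s4 s5 <;> simp_all
  · rintro ⟨h1, h2, hs⟩
    rw [if_neg h1, if_neg h2]
    have f0 := pvSw_false (pvBasename x) "app." "main." 'a' 'm' (by decide) (by decide) (by decide) hs
    have f1 := pvSw_false (pvBasename x) "app." "index." 'a' 'i' (by decide) (by decide) (by decide) hs
    simp at f0 f1 hs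
    simp [f0, f1, hs]

theorem pvRank_iff_3 (x : String) : pvRank x = some 3 ↔
    (¬ PySem.Str.count x "/" > 2 ∧ pvExt x ∉ pvSkipExts ∧
      PySem.Str.startswith (pvBasename x) "server." = true) := by
  rw [pvRank_unfold]
  constructor
  · intro h
    by_cases h1 : PySem.Str.count x "/" > 2
    · rw [if_pos h1] at h; simp at h
    rw [if_neg h1] at h
    by_cases h2 : pvExt x ∈ pvSkipExts
    · rw [if_pos h2] at h; simp at h
    rw [if_neg h2] at h
    refine ⟨h1, h2, ?_⟩
    split_ifs at h with s0 s1 s2 s3 s4 s5 <;> simp_all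
  · rintro ⟨h1, h2, hs⟩
    rw [if_neg h1, if_neg h2]
    have f0 := pvSw_false (pvBasename x) "server." "main." 's' 'm' (by decide) (by decide) (by decide) hs
    have f1 := pvSw_false (pvBasename x) "server." "index." 's' 'i' (by decide) (by decide) (by decide) hs
    have f2 := pvSw_false (pvBasename x) "server." "app." 's' 'a' (by decide) (by decide) (by decide) hs
    simp at f0 f1 f2 hs
    simp [f0, f1, f2, hs]

theorem pvRank_iff_4 (x : String) : pvRank x = some 4 ↔
    (¬ PySem.Str.count x "/" > 2 ∧ pvExt x ∉ pvSkipExts ∧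
      PySem.Str.startswith (pvBasename x) "cli." = true) := by
  rw [pvRank_unfold]
  constructor
  · intro h
    by_cases h1 : PySem.Str.count x "/" > 2
    · rw [if_pos h1] at h; simp at h
    rw [if_neg h1] at h
    by_cases h2 : pvExt x ∈ pvSkipExts
    · rw [if_pos h2] at h; simp at h
    rw [if_neg h2] at h
    refine ⟨h1, h2, ?_⟩
    split_ifs at h with s0 s1 s2 s3 s4 s5 <;> simp_all
  · rintro ⟨h1, h2, hs⟩
    rw [if_neg h1, if_neg h2]
    have f0 := pvSw_false (pvBasename x) "cli." "main." 'c' 'm' (by decide) (by decide) (by decide) hs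
    have f1 := pvSw_false (pvBasename x) "cli." "index." 'c' 'i' (by decide) (by decide) (by decide) hs
    have f2 := pvSw_false (pvBasename x) "cli." "app." 'c' 'a' (by decide) (by decide) (by decide) hs
    have f3 := pvSw_false (pvBasename x) "cli." "server." 'c' 's' (by decide) (by decide) (by decide) hs
    simp at f0 f1 f2 f3 hs
    simp [f0, f1, f2, f3, hs]

theorem pvRank_iff_5 (x : String) : pvRank x = some 5 ↔
    (¬ PySem.Str.count x "/" > 2 ∧ pvExt x ∉ pvSkipExts ∧
      PySem.Str.startswith (pvBasename x) "lib." = true) := by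
  rw [pvRank_unfold]
  constructor
  · intro h
    by_cases h1 : PySem.Str.count x "/" > 2
    · rw [if_pos h1] at h; simp at h
    rw [if_neg h1] at h
    by_cases h2 : pvExt x ∈ pvSkipExts
    · rw [if_pos h2] at h; simp at h
    rw [if_neg h2] at h
    refine ⟨h1, h2, ?_⟩
    split_ifs at h with s0 s1 s2 s3 s4 s5 <;> simp_all
  · rintro ⟨h1, h2, hs⟩
    rw [if_neg h1, if_neg h2]
    have f0 := pvSw_false (pvBasename x) "lib." "main." 'l' 'm' (by decide) (by decide) (by decide) hs
    have f1 := pvSw_false (pvBasename x) "lib." "index." 'l' 'i' (by decide) (by decide) (by decide) hs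
    have f2 := pvSw_false (pvBasename x) "lib." "app." 'l' 'a' (by decide) (by decide) (by decide) hs
    have f3 := pvSw_false (pvBasename x) "lib." "server." 'l' 's' (by decide) (by decide) (by decide) hs
    have f4 := pvSw_false (pvBasename x) "lib." "cli." 'l' 'c' (by decide) (by decide) (by decide) hs
    simp at f0 f1 f2 f3 f4 hs
    simp [f0, f1, f2, f3, f4, hs]

-- a pattern whose basename is pre ++ "*" tests exactly "starts with pre"
theorem pvFnmatch_eq (b pat pre : String) (h : pat.toList.dropLast = pre.toList) :
    pvFnmatch b pat = PySem.Str.startswith b pre := by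
  rw [pvFnmatch, PySem.Str.startswith_eq, h]

-- packages a pvRank_iff_k fact into the hypothesis shape pvFoldlA takes, for one concrete pattern
theorem pvHm (P pre : String) (k : Int) (hdrop : (pvBasename P).toList.dropLast = pre.toList)
    (hiff : ∀ x, pvRank x = some k ↔ (¬ PySem.Str.count x "/" > 2 ∧ pvExt x ∉ pvSkipExts ∧
      PySem.Str.startswith (pvBasename x) pre = true)) :
    ∀ x, pvRank x = some k ↔ (¬ PySem.Str.count x "/" > 2 ∧ pvExt x ∉ pvSkipExts ∧
      pvFnmatch (pvBasename x) (pvBasename P) = true) := fun x => by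
  rw [pvFnmatch_eq _ _ pre hdrop]
  exact hiff x

theorem pvMainCore (tp hd : List String) :
    (pvEntryPatterns.foldl (fun entries pattern =>
      tp.foldl (fun entries path =>
        if PySem.Str.count path "/" > 2 then entries
        else if pvExt path ∈ pvSkipExts then entries
        else if pvFnmatch (pvBasename path) (pvBasename pattern) = true then
          if path ∉ entries then entries ++ [path] else entries
        else entries) entries) hd).take 5
    = (hd ++ (PySem.List.pyRange 0 (pvPrefixes.length : Int) 1).flatMap
        (fun r => (((tp.foldl (fun (st : PySem.Set String × List (Int × String)) path =>
            match pvRank path with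
            | some r => if PySem.Set.contains st.1 path then st else (PySem.Set.add st.1 path, st.2 ++ [(r, path)])
            | none => st) (PySem.Set.ofList hd, [])).2.filter (fun rp => rp.1 == r)).map (·.2)))).take 5 := by
  have hyp : ∀ (r : Int) (y : String), pvRank y = some r →
      (PySem.Set.contains (PySem.Set.ofList hd) y = true ↔ y ∈ hd) := fun r y _ => by
    rw [PySem.Set.contains_iff, PySem.Set.mem_ofList]
  have hne : ∀ (a b : Int), a ≠ b → ∀ y ∈ pvNews a hd tp, pvRank y ≠ some b :=
    fun a b hab y hy hc => hab (Option.some.inj ((pvNews_rank a tp hd y hy).symm.trans hc))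
  rw [show pvEntryPatterns = ["main.*", "index.*", "app.*", "server.*", "cli.*", "cmd/main.*",
    "src/main.*", "src/index.*", "src/app.*", "src/lib.*", "lib/index.*"] from rfl]
  simp only [List.foldl_cons, List.foldl_nil]
  rw [pvFoldlA "main.*" 0 (pvHm "main.*" "main." 0 (by decide) pvRank_iff_0) tp]
  rw [pvFoldlA "index.*" 1 (pvHm "index.*" "index." 1 (by decide) pvRank_iff_1) tp]
  rw [pvFoldlA "app.*" 2 (pvHm "app.*" "app." 2 (by decide) pvRank_iff_2) tp]
  rw [pvFoldlA "server.*" 3 (pvHm "server.*" "server." 3 (by decide) pvRank_iff_3) tp]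
  rw [pvFoldlA "cli.*" 4 (pvHm "cli.*" "cli." 4 (by decide) pvRank_iff_4) tp]
  rw [pvFoldlA "cmd/main.*" 0 (pvHm "cmd/main.*" "main." 0 (by decide) pvRank_iff_0) tp]
  rw [pvFoldlA "src/main.*" 0 (pvHm "src/main.*" "main." 0 (by decide) pvRank_iff_0) tp]
  rw [pvFoldlA "src/index.*" 1 (pvHm "src/index.*" "index." 1 (by decide) pvRank_iff_1) tp]
  rw [pvFoldlA "src/app.*" 2 (pvHm "src/app.*" "app." 2 (by decide) pvRank_iff_2) tp]
  rw [pvFoldlA "src/lib.*" 5 (pvHm "src/lib.*" "lib." 5 (by decide) pvRank_iff_5) tp]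
  rw [pvFoldlA "lib/index.*" 1 (pvHm "lib/index.*" "index." 1 (by decide) pvRank_iff_1) tp]
  have e1 : pvNews 1 (hd ++ pvNews 0 hd tp) tp = pvNews 1 hd tp :=
    pvNews_drop_append 1 tp hd _ (hne 0 1 (by decide))
  simp only [e1]
  have e2 : pvNews 2 (hd ++ pvNews 0 hd tp ++ pvNews 1 hd tp) tp = pvNews 2 hd tp := by
    rw [pvNews_drop_append 2 tp _ _ (hne 1 2 (by decide)),
        pvNews_drop_append 2 tp _ _ (hne 0 2 (by decide))]
  simp only [e2]
  have e3 : pvNews 3 (hd ++ pvNews 0 hd tp ++ pvNews 1 hd tp ++ pvNews 2 hd tp) tp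
      = pvNews 3 hd tp := by
    rw [pvNews_drop_append 3 tp _ _ (hne 2 3 (by decide)),
        pvNews_drop_append 3 tp _ _ (hne 1 3 (by decide)),
        pvNews_drop_append 3 tp _ _ (hne 0 3 (by decide))]
  simp only [e3]
  have e4 : pvNews 4 (hd ++ pvNews 0 hd tp ++ pvNews 1 hd tp ++ pvNews 2 hd tp ++ pvNews 3 hd tp) tp
      = pvNews 4 hd tp := by
    rw [pvNews_drop_append 4 tp _ _ (hne 3 4 (by decide)),
        pvNews_drop_append 4 tp _ _ (hne 2 4 (by decide)),
        pvNews_drop_append 4 tp _ _ (hne 1 4 (by decide)),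
        pvNews_drop_append 4 tp _ _ (hne 0 4 (by decide))]
  simp only [e4]
  have habs : ∀ (r : Int) x, x ∈ tp → pvRank x = some r →
      x ∈ hd ∨ x ∈ pvNews r hd tp := fun r x hx hr => pvNews_absorb r tp hd x hx hr
  have dup0 : pvNews 0 (hd ++ pvNews 0 hd tp ++ pvNews 1 hd tp ++ pvNews 2 hd tp
      ++ pvNews 3 hd tp ++ pvNews 4 hd tp) tp = [] :=
    pvNews_nil 0 tp _ (fun x hx hr => by
      rcases habs 0 x hx hr with h | h <;> simp [List.mem_append, h])
  simp only [dup0, List.append_nil]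
  have dup1 : pvNews 1 (hd ++ pvNews 0 hd tp ++ pvNews 1 hd tp ++ pvNews 2 hd tp
      ++ pvNews 3 hd tp ++ pvNews 4 hd tp) tp = [] :=
    pvNews_nil 1 tp _ (fun x hx hr => by
      rcases habs 1 x hx hr with h | h <;> simp [List.mem_append, h])
  simp only [dup1, List.append_nil]
  have dup2 : pvNews 2 (hd ++ pvNews 0 hd tp ++ pvNews 1 hd tp ++ pvNews 2 hd tp
      ++ pvNews 3 hd tp ++ pvNews 4 hd tp) tp = [] :=
    pvNews_nil 2 tp _ (fun x hx hr => by
      rcases habs 2 x hx hr with h | h <;> simp [List.mem_append, h])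
  simp only [dup2, List.append_nil]
  have e5 : pvNews 5 (hd ++ pvNews 0 hd tp ++ pvNews 1 hd tp ++ pvNews 2 hd tp
      ++ pvNews 3 hd tp ++ pvNews 4 hd tp) tp = pvNews 5 hd tp := by
    rw [pvNews_drop_append 5 tp _ _ (hne 4 5 (by decide)),
        pvNews_drop_append 5 tp _ _ (hne 3 5 (by decide)),
        pvNews_drop_append 5 tp _ _ (hne 2 5 (by decide)),
        pvNews_drop_append 5 tp _ _ (hne 1 5 (by decide)),
        pvNews_drop_append 5 tp _ _ (hne 0 5 (by decide))]
  simp only [e5]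
  have dup1b : pvNews 1 (hd ++ pvNews 0 hd tp ++ pvNews 1 hd tp ++ pvNews 2 hd tp
      ++ pvNews 3 hd tp ++ pvNews 4 hd tp ++ pvNews 5 hd tp) tp = [] :=
    pvNews_nil 1 tp _ (fun x hx hr => by
      rcases habs 1 x hx hr with h | h <;> simp [List.mem_append, h])
  simp only [dup1b, List.append_nil]
  rw [show PySem.List.pyRange 0 (pvPrefixes.length : Int) 1 = [0, 1, 2, 3, 4, 5] from by decide]
  simp only [List.flatMap_cons, List.flatMap_nil]
  rw [pvFoldlB 0 tp (PySem.Set.ofList hd) [] hd (hyp 0),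
      pvFoldlB 1 tp (PySem.Set.ofList hd) [] hd (hyp 1),
      pvFoldlB 2 tp (PySem.Set.ofList hd) [] hd (hyp 2),
      pvFoldlB 3 tp (PySem.Set.ofList hd) [] hd (hyp 3),
      pvFoldlB 4 tp (PySem.Set.ofList hd) [] hd (hyp 4),
      pvFoldlB 5 tp (PySem.Set.ofList hd) [] hd (hyp 5)]
  simp [List.append_assoc]

theorem detect_entry_points_spec : Claim_equal_detect_entry_points := by
  intro tp mh _
  unfold Spec_detect_entry_points detect_entry_points detect_entry_points_alt
  exact pvMainCore tp _
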